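-- pv_equiv track=rewrite | github.com/dhirendra14dev/physics-platform | quiz/management/commands/import_questions.py | parse_braced_content
-- ===== SOURCE A (Python) =====
-- def parse_braced_content(text, start_index):
--     """
--     Parses content enclosed in braces {}, handling nesting.
--     Returns (content, end_index)
--     """
--     if start_index >= len(text) or text[start_index] != '{':
--         return None, start_index
--
--     balance = 1
--     i = start_index + 1
--     content_start = i
--
--     while i < len(text) and balance > 0:
--         if text[i] == '{':
--             balance += 1
--         elif text[i] == '}':
--             balance -= 1
--         i += 1
--
--     if balance == 0:
--         return text[content_start:i-1], i
--     return None, i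
-- ===== SOURCE B (Python) =====
-- def _skip_group(text, i):
--     """Return the index just past the '}' closing the group whose body starts
--     at i, skipping nested groups recursively; None if the group is unclosed."""
--     n = len(text)
--     while i < n:
--         c = text[i]
--         if c == '}':
--             return i + 1
--         if c == '{':
--             i = _skip_group(text, i + 1)
--             if i is None:
--                 return None
--         else:
--             i += 1
--     return None
--
--
-- def parse_braced_content(text, start_index):
--     if start_index >= len(text) or text[start_index] != '{':
--         return None, start_index
--     end = _skip_group(text, start_index + 1)
--     if end is None:
--         return None, len(text)
--     return text[start_index + 1:end - 1], end
-- ===== Notes on version B (the rewrite author's own statement) =====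
-- stated objective: alternative
-- what changed: Replaces A's single while-loop with an integer balance counter by a recursive group-skipper: a helper scans from just after the opening brace, recursing to skip each nested group and returning the index past the matching '}', so no balance counter exists.
import Mathlib
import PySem

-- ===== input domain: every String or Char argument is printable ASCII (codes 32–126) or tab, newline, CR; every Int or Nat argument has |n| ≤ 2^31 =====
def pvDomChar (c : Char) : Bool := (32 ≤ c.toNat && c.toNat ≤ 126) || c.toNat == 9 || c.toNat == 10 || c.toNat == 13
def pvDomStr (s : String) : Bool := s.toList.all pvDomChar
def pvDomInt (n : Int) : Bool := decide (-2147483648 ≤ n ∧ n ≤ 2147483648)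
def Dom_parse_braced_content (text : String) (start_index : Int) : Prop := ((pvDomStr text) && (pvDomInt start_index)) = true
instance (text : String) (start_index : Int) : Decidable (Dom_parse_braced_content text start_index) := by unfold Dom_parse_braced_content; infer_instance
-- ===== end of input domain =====

-- B replaces A's single balance-counting loop by a recursive group-skipper (recursion on nesting depth); objective: alternative decomposition, same cost.

-- ===== PORT A =====
-- A's while loop: scan from i while i < len(text) and balance > 0, adjusting balance on '{'/'}'.
def pvAloop (cs : List Char) (i : Int) (balance : Int) : Int × Int :=
  if h : i < (cs.length : Int) ∧ 0 < balance then
    let b' : Int :=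
      if PySem.List.pyGet? cs i = some '{' then balance + 1
      else if PySem.List.pyGet? cs i = some '}' then balance - 1
      else balance
    pvAloop cs (i + 1) b'
  else (i, balance)
termination_by ((cs.length : Int) - i).toNat
decreasing_by omega

def parse_braced_content (text : String) (start_index : Int) : Option String × Int :=
  if start_index ≥ (text.toList.length : Int) ∨ PySem.Str.pyGet? text start_index ≠ some '{' then
    (none, start_index)
  else
    let content_start := start_index + 1
    let r := pvAloop text.toList content_start 1
    if r.2 = 0 then
      (some (PySem.Str.slice text (some content_start) (some (r.1 - 1))), r.1)
    else
      (none, r.1)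

-- ===== PORT B =====
-- Source B's _skip_group: the while loop is the tail recursion; on '{' it recurses to skip the
-- nested group and continues from its end.  The subtype on the result (i < j ∧ j ≤ len) is
-- termination bookkeeping only; the computed index is exactly _skip_group's.
def pvSkipGroup (cs : List Char) (i : Int) : Option {j : Int // i < j ∧ j ≤ (cs.length : Int)} :=
  if h : i < (cs.length : Int) then
    if PySem.List.pyGet? cs i = some '}' then
      some ⟨i + 1, by omega⟩
    else if PySem.List.pyGet? cs i = some '{' then
      match pvSkipGroup cs (i + 1) with
      | none => none
      | some ⟨j, hj⟩ =>
        match pvSkipGroup cs j with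
        | none => none
        | some ⟨k, hk⟩ => some ⟨k, by omega⟩
    else
      match pvSkipGroup cs (i + 1) with
      | none => none
      | some ⟨j, hj⟩ => some ⟨j, by omega⟩
  else none
termination_by ((cs.length : Int) - i).toNat
decreasing_by all_goals omega

def parse_braced_content_alt (text : String) (start_index : Int) : Option String × Int :=
  if start_index ≥ (text.toList.length : Int) ∨ PySem.Str.pyGet? text start_index ≠ some '{' then
    (none, start_index)
  else
    match pvSkipGroup text.toList (start_index + 1) with
    | none => (none, (text.toList.length : Int))
    | some ⟨e, _⟩ =>
      (some (PySem.Str.slice text (some (start_index + 1)) (some (e - 1))), e)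

-- ===== PRECONDITION & SPEC =====
-- Pre_ excludes start_index < -len(text), exactly where Python's text[start_index] raises IndexError (in both A and B).
def Pre_parse_braced_content (text : String) (start_index : Int) : Prop :=
  -(text.toList.length : Int) ≤ start_index
instance (text : String) (start_index : Int) : Decidable (Pre_parse_braced_content text start_index) := by unfold Pre_parse_braced_content; infer_instance

def pvWitness_parse_braced_content : String × Int := ("{a{b}c}", 0)

def Spec_parse_braced_content (text : String) (start_index : Int) (out : Option String × Int) : Prop := out = parse_braced_content_alt text start_index
instance (text : String) (start_index : Int) (out : Option String × Int) : Decidable (Spec_parse_braced_content text start_index out) := by unfold Spec_parse_braced_content; infer_instance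

-- ===== CLAIM (what is proved, stated in full; the proofs are below) =====
def Claim_equal_parse_braced_content : Prop := ∀ (text : String) (start_index : Int), Dom_parse_braced_content text start_index → Pre_parse_braced_content text start_index → Spec_parse_braced_content text start_index (parse_braced_content text start_index)

-- ===== LEMMAS AND PROOFS =====

theorem pvAloop_zero (cs : List Char) (i : Int) : pvAloop cs i 0 = (i, 0) := by
  unfold pvAloop; simp

-- The bridge: skipping one group from i (balance 1 pending close) is what the balance loop does.
theorem pvSkip_vs_aloop (cs : List Char) :
    ∀ n (i : Int), ((cs.length : Int) - i).toNat = n → i ≤ (cs.length : Int) →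
      ∀ b : Int, 0 < b →
      (match pvSkipGroup cs i with
       | some j => pvAloop cs i b = pvAloop cs j.val (b - 1)
       | none => ∃ b', b ≤ b' ∧ pvAloop cs i b = ((cs.length : Int), b')) := by
  intro n
  induction n using Nat.strong_induction_on with
  | _ n ih =>
    intro i hn hile b hb
    by_cases hlt : i < (cs.length : Int)
    · rw [pvSkipGroup]
      rw [dif_pos hlt]
      rw [pvAloop, dif_pos ⟨hlt, hb⟩]
      by_cases hcl : PySem.List.pyGet? cs i = some '}'
      · simp only [hcl]
        simp
      · by_cases hop : PySem.List.pyGet? cs i = some '{'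
        · simp only [hop]
          simp only [Option.some.injEq, show ('{' = '}') = False by simp, if_false, if_pos]
          have h1 := ih (((cs.length : Int) - (i+1)).toNat) (by omega) (i+1) rfl (by omega) (b+1) (by omega)
          rcases hs1 : pvSkipGroup cs (i+1) with _ | ⟨j, hj⟩
          · simp only [hs1] at h1 ⊢
            obtain ⟨b', hb1, hb2⟩ := h1
            exact ⟨b', by omega, hb2⟩
          · simp only [hs1] at h1
            simp only [show b + 1 - 1 = b by omega] at h1
            have h2 := ih (((cs.length : Int) - j).toNat) (by omega) j rfl (by omega) b hb
            rcases hs2 : pvSkipGroup cs j with _ | ⟨k, hk⟩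
            · simp only [hs2] at h2 ⊢
              obtain ⟨b', hb1, hb2⟩ := h2
              exact ⟨b', hb1, by rw [h1, hb2]⟩
            · simp only [hs2] at h2 ⊢
              rw [h1]; exact h2
        · simp only [if_neg hcl, if_neg hop]
          have h1 := ih (((cs.length : Int) - (i+1)).toNat) (by omega) (i+1) rfl (by omega) b hb
          rcases hs1 : pvSkipGroup cs (i+1) with _ | ⟨j, hj⟩
          · simp only [hs1] at h1 ⊢
            exact h1
          · simp only [hs1] at h1 ⊢
            exact h1
    · have hie : i = (cs.length : Int) := by omega
      rw [pvSkipGroup, dif_neg hlt]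
      rw [pvAloop, dif_neg (by omega)]
      exact ⟨b, le_refl b, by rw [hie]⟩

-- ===== VERDICT (by name: the statement is the Claim_ definition above) =====
theorem parse_braced_content_spec : Claim_equal_parse_braced_content := by
  intro text s _hdom _hpre
  unfold Spec_parse_braced_content parse_braced_content parse_braced_content_alt
  by_cases hg : s ≥ (text.toList.length : Int) ∨ PySem.Str.pyGet? text s ≠ some '{'
  · rw [if_pos hg, if_pos hg]
  · rw [if_neg hg, if_neg hg]
    rw [not_or, not_not] at hg
    obtain ⟨hg1, hg2⟩ := hg
    rw [not_le] at hg1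
    have hslen : s < (text.toList.length : Int) := by omega
    have key := pvSkip_vs_aloop text.toList (((text.toList.length : Int) - (s+1)).toNat)
      (s+1) rfl (by omega) 1 (by omega)
    rcases hs : pvSkipGroup text.toList (s+1) with _ | ⟨e, he⟩
    · simp only [hs] at key
      obtain ⟨b', hb1, hb2⟩ := key
      simp only [hb2]
      have : b' ≠ 0 := by omega
      simp [this]
    · simp only [hs] at key
      simp only [show (1:Int) - 1 = 0 from rfl] at key
      simp [key, pvAloop_zero]
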